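-- pv_equiv track=rewrite | github.com/horiz31/p_deploy | patrios_app/iw2json.py | response_to_dictionary
-- ===== SOURCE A (Python) =====
-- def _parse_station(s):
--     """Parse one station output.  Return MAC and key/value dictionary."""
--     mac = s[len('Station '):-1].split('(')[0].strip()
--     d = {}
--     lines = s.split('\n')
--     for line in lines[1:]:
--         kv = line.split(':')
--         if len(kv)<2:
--             continue
--         k = kv[0].strip()
--         v = kv[1].strip().split(' ')[0]
--         if len(k)>0:
--             d[k] = v
--     return mac, d
--
-- def response_to_dictionary(r):
--     """Parse iw station dump output into a dictionary indexed by MAC address."""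
--     d = {}
--     end = start = -1
--     while len(r)>len('Station'):
--         try:
--             start = r.index('Station',end+1)
--             end = r.index('Station',start+1)
--             mac, kv = _parse_station(r[start:end])
--             d[mac] = kv
--             end = end - 1
--         except ValueError:
--             if start >= 0:
--                 mac, kv = _parse_station(r[start:-1])
--                 d[mac] = kv
--             break
--     return d
-- ===== SOURCE B (Python) =====
-- def _parse_station(s):
--     """Parse one station output.  Return MAC and key/value dictionary."""
--     mac = s[len('Station '):-1].split('(')[0].strip()
--     d = {}
--     lines = s.split('\n')
--     for line in lines[1:]:
--         kv = line.split(':')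
--         if len(kv)<2:
--             continue
--         k = kv[0].strip()
--         v = kv[1].strip().split(' ')[0]
--         if len(k)>0:
--             d[k] = v
--     return mac, d
--
-- def response_to_dictionary(r):
--     """Parse iw station dump output into a dictionary indexed by MAC address."""
--     d = {}
--     if len(r) <= len('Station'):
--         return d
--     # first pass: collect all positions where 'Station' begins
--     bounds = []
--     pos = r.find('Station')
--     while pos != -1:
--         bounds.append(pos)
--         pos = r.find('Station', pos + 1)
--     # second pass: parse each block between consecutive boundaries
--     while bounds:
--         b = bounds[0]
--         rest = bounds[1:]
--         s = r[b:rest[0]] if rest else r[b:-1]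
--         mac, kv = _parse_station(s)
--         d[mac] = kv
--         bounds = rest
--     return d
-- ===== Notes on version B (the rewrite author's own statement) =====
-- stated objective: alternative
-- what changed: Replaces A's single interleaved two-pointer loop (index/parse/try-except, re-finding each marker twice) with two separate passes: first collect every start position of the station marker into a boundary list, then parse the block between consecutive boundaries (last block up to the penultimate character).
import Mathlib
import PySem

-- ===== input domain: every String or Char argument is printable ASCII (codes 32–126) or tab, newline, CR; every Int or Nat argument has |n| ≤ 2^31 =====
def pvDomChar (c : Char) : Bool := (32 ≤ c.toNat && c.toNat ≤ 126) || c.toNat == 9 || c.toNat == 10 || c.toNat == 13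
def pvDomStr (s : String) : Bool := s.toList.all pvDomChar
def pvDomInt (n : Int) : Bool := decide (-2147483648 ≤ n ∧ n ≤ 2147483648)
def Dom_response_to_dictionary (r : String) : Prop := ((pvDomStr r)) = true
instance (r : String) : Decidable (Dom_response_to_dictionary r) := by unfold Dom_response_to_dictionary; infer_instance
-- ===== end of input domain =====

-- B replaces A's interleaved index/parse try-except loop with two separate passes
-- (collect all 'Station' start positions first, then parse the block between consecutive
-- positions); objective: alternative decomposition, same value on every input.

-- ===== PORT A =====
-- shared helper: literal transliteration of _parse_station (identical in Source A and Source B)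
def parseStation (s : String) : String × List (String × String) :=
  -- mac = s[len('Station '):-1].split('(')[0].strip()
  let mac := PySem.Str.strip ((((PySem.Str.split? (PySem.Str.slice s (some 8) (some (-1))) "(").getD []).headD ""))
  -- for line in lines[1:]: …
  let lines := (PySem.Str.split? s "\n").getD []
  let d := (PySem.List.slice lines (some 1) none).foldl (fun (d : PySem.Dict String String) line =>
      let kv := (PySem.Str.split? line ":").getD []
      if kv.length < 2 then d
      else
        let k := PySem.Str.strip ((PySem.List.pyGet? kv 0).getD "")
        let v := (((PySem.Str.split? (PySem.Str.strip ((PySem.List.pyGet? kv 1).getD "")) " ").getD []).headD "")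
        if 0 < PySem.Str.len k then d.insert k v else d)
    PySem.Dict.empty
  (mac, d.items)

-- A's while loop: state (d, start, end); try/except ValueError ported as the -1 branch of find
def aLoop (r : String) (start e : Int) (d : PySem.Dict String (List (String × String))) :
    Nat → PySem.Dict String (List (String × String))
  | 0 => d
  | fuel + 1 =>
    if 7 < PySem.Str.len r then
      let st := PySem.Str.findFrom r "Station" (e + 1)
      if st = -1 then
        -- except on the first index: start unchanged
        if 0 ≤ start then
          let mk := parseStation (PySem.Str.slice r (some start) (some (-1)))
          d.insert mk.1 mk.2
        else d
      else
        let en := PySem.Str.findFrom r "Station" (st + 1)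
        if en = -1 then
          -- except on the second index: start = st ≥ 0
          let mk := parseStation (PySem.Str.slice r (some st) (some (-1)))
          d.insert mk.1 mk.2
        else
          let mk := parseStation (PySem.Str.slice r (some st) (some en))
          aLoop r st (en - 1) (d.insert mk.1 mk.2) fuel
    else d

def response_to_dictionary (r : String) : List (String × List (String × String)) :=
  (aLoop r (-1) (-1) PySem.Dict.empty (r.toList.length + 1)).items

-- ===== PORT B =====
-- pass 1: all positions where 'Station' begins
def bBounds (r : String) (pos : Int) : Nat → List Int
  | 0 => []
  | fuel + 1 =>
    let p := PySem.Str.findFrom r "Station" pos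
    if p = -1 then [] else p :: bBounds r (p + 1) fuel

-- pass 2: parse the block between consecutive boundaries (last block ends at -1)
def bFold (r : String) (d : PySem.Dict String (List (String × String))) :
    List Int → PySem.Dict String (List (String × String))
  | [] => d
  | [b] =>
    let mk := parseStation (PySem.Str.slice r (some b) (some (-1)))
    d.insert mk.1 mk.2
  | b :: b2 :: rest =>
    let mk := parseStation (PySem.Str.slice r (some b) (some b2))
    bFold r (d.insert mk.1 mk.2) (b2 :: rest)

def response_to_dictionary_alt (r : String) : List (String × List (String × String)) :=
  if PySem.Str.len r ≤ 7 then (PySem.Dict.empty (κ := String) (ν := List (String × String))).items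
  else (bFold r PySem.Dict.empty (bBounds r 0 (r.toList.length + 1))).items

-- ===== PRECONDITION & SPEC =====
def Spec_response_to_dictionary (r : String) (out : List (String × List (String × String))) : Prop := out = response_to_dictionary_alt r
instance (r : String) (out : List (String × List (String × String))) : Decidable (Spec_response_to_dictionary r out) := by unfold Spec_response_to_dictionary; infer_instance

-- ===== CLAIM (what is proved, stated in full; the proofs are below) =====
def Claim_equal_response_to_dictionary : Prop := ∀ (r : String), Dom_response_to_dictionary r → Spec_response_to_dictionary r (response_to_dictionary r)

-- ===== LEMMAS AND PROOFS =====

-- find on a list that starts with the pattern returns 0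
lemma find_of_prefix {l S : List Char} (h : S <+: l) : PySem.Chars.find l S = 0 := by
  have h0 : 0 ≤ PySem.Chars.find l S := (PySem.Chars.find_nonneg_iff l S).2 h.isInfix
  obtain ⟨-, hmin⟩ := PySem.Chars.find_spec h0
  by_contra hne
  have hpos : 0 < (PySem.Chars.find l S).toNat := by omega
  exact hmin 0 hpos (by simpa using h)

-- searching from an occurrence finds that occurrence
lemma findFrom_at_occ {l S : List Char} (q : Nat) (hq : q ≤ l.length)
    (h : S <+: l.drop q) : PySem.Chars.findFrom l S (q : Int) = (q : Int) := by
  rw [PySem.Chars.findFrom_natCast l S q hq, find_of_prefix h]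
  simp

-- a prefix occurrence of 'Station' leaves 7 characters of room
lemma occ_bound {l : List Char} {q : Nat} (h : "Station".toList <+: l.drop q) :
    q + 7 ≤ l.length := by
  have := h.length_le
  simp at this
  omega

-- the main correspondence: A's loop, about to search from position p where the next
-- occurrence is en, equals B's fold over the boundary list collected from p
lemma loop_eq (r : String) : ∀ (fuel : Nat) (p en : Nat)
    (d : PySem.Dict String (List (String × String))) (s : Int),
    7 < PySem.Str.len r →
    PySem.Chars.findFrom r.toList "Station".toList (p : Int) = (en : Int) →
    "Station".toList <+: r.toList.drop en →
    r.toList.length ≤ en + fuel →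
    aLoop r s ((p : Int) - 1) d (fuel + 1) = bFold r d (bBounds r (p : Int) (fuel + 1)) := by
  intro fuel
  induction fuel using Nat.strong_induction_on with
  | _ fuel ih =>
    intro p en d s hlen hfind hocc hfuel
    have hen7 : en + 7 ≤ r.toList.length := occ_bound hocc
    -- fuel is large: peel one unit
    obtain ⟨fuel', rfl⟩ : ∃ f, fuel = f + 1 := ⟨fuel - 1, by omega⟩
    have hcast : ((p : Int) - 1 + 1) = (p : Int) := by ring
    rw [aLoop, bBounds, if_pos hlen]
    simp only [PySem.Str.findFrom_eq, hcast, hfind]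
    have hne : ¬ ((en : Int) = -1) := by omega
    rw [if_neg hne, if_neg hne]
    -- the second search, from en + 1
    have hen1 : en + 1 ≤ r.toList.length := by omega
    by_cases h2 : PySem.Chars.findFrom r.toList "Station".toList ((en : Int) + 1) = -1
    · -- no further occurrence: A's except branch = B's last block
      rw [bBounds]
      simp only [PySem.Str.findFrom_eq]
      rw [if_pos h2, if_pos h2]
      simp only [bFold]
    · -- next occurrence en2: one parsed block, then recurse
      have hcast1 : (((en + 1 : Nat)) : Int) = (en : Int) + 1 := by push_cast; ring
      have h2' : PySem.Chars.findFrom r.toList "Station".toList ((en + 1 : Nat) : Int) ≠ -1 := by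
        rw [hcast1]; exact h2
      obtain ⟨hle2, hocc2, -⟩ :=
        PySem.Chars.findFrom_natCast_spec r.toList "Station".toList (en + 1) hen1 h2'
      rw [hcast1] at hle2 hocc2
      set en2 : Nat := (PySem.Chars.findFrom r.toList "Station".toList ((en : Int) + 1)).toNat with hen2
      have hFeq : PySem.Chars.findFrom r.toList "Station".toList ((en : Int) + 1) = (en2 : Int) := by
        omega
      have hle2' : en + 1 ≤ en2 := by omega
      have hocc2' : "Station".toList <+: r.toList.drop en2 := hocc2
      have hen27 : en2 + 7 ≤ r.toList.length := occ_bound hocc2'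
      have hfind2 : PySem.Chars.findFrom r.toList "Station".toList ((en2 : Nat) : Int) = ((en2 : Nat) : Int) :=
        findFrom_at_occ en2 (by omega) hocc2'
      rw [hFeq]
      rw [if_neg (by omega : ¬ ((en2 : Int) = -1))]
      have hbstep : bBounds r ((en : Int) + 1) (fuel' + 1) = (en2 : Int) :: bBounds r ((en2 : Int) + 1) fuel' := by
        rw [bBounds]
        simp only [PySem.Str.findFrom_eq]
        rw [hFeq]
        rw [if_neg (by omega : ¬ ((en2 : Int) = -1))]
      have hb2 : bBounds r ((en2 : Int)) (fuel' + 1) = (en2 : Int) :: bBounds r ((en2 : Int) + 1) fuel' := by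
        rw [bBounds]
        simp only [PySem.Str.findFrom_eq]
        rw [hfind2]
        rw [if_neg (by omega : ¬ ((en2 : Int) = -1))]
      rw [hbstep, bFold, ← hb2]
      exact ih fuel' (by omega) en2 en2 _ ((en : Int)) hlen hfind2 hocc2' (by omega)

-- ===== VERDICT (by name: the statement is the Claim_ definition above) =====
theorem response_to_dictionary_spec : Claim_equal_response_to_dictionary := by
  intro r _
  unfold Spec_response_to_dictionary response_to_dictionary response_to_dictionary_alt
  by_cases hlen : PySem.Str.len r ≤ 7
  · -- tiny input: A's while guard fails immediately
    rw [if_pos hlen, aLoop, if_neg (by omega)]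
  · rw [if_neg hlen]
    have hlen' : 7 < PySem.Str.len r := by omega
    have hlist : 7 < r.toList.length := by
      have := PySem.Str.len_eq r; omega
    by_cases h0 : PySem.Chars.find r.toList "Station".toList = -1
    · -- no 'Station' at all: both give the empty dict
      rw [aLoop, bBounds, if_pos hlen']
      simp only [PySem.Str.findFrom_eq]
      norm_num
      rw [if_pos h0, if_pos h0]
      simp only [bFold]
    · -- first occurrence at q: the main loop correspondence takes over
      have hnn : 0 ≤ PySem.Chars.find r.toList "Station".toList := by
        have := PySem.Chars.neg_one_le_find r.toList "Station".toList
        omega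
      obtain ⟨hocc, -⟩ := PySem.Chars.find_spec hnn
      set q : Nat := (PySem.Chars.find r.toList "Station".toList).toNat with hqdef
      have hq : PySem.Chars.find r.toList "Station".toList = (q : Int) := by omega
      have hfind0 : PySem.Chars.findFrom r.toList "Station".toList ((0 : Nat) : Int) = (q : Int) := by
        rw [Nat.cast_zero, PySem.Chars.findFrom_zero]; exact hq
      have hmain := loop_eq r r.toList.length 0 q PySem.Dict.empty (-1) hlen' hfind0 hocc (by omega)
      norm_num at hmain
      simp only [String.length_toList]
      rw [hmain]
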